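-- pv_equiv track=rewrite | github.com/joshanashakya/dissertation | workspace/dataset/java-python/GeeksForGeeks/3701/A/2.py | solve
-- ===== SOURCE A (Python) =====
-- def solve(n):
--
--     low = 1
--     high = 10**4
--     x, p = n, 0
--
--     # Binary search for the row number
--     while (low <= high):
--         mid = (low + high) // 2
--         sum = (mid * (mid + 1)) // 2
--
--         # Condition to get the maximum
--         # x that satisfies the criteria
--         if (x - sum >= 1):
--             p = mid
--             low = mid + 1
--         else :
--             high = mid - 1
--
--     start, end, y, q = 1, 10**4, 1, 0
--
--     # Binary search for the column number
--     while (start <= end):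
--         mid = (start + end) // 2
--         sum = (mid * (mid + 1)) // 2
--
--         # Condition to get the maximum
--         # y that satisfies the criteria
--         if (y + sum <= n):
--             q = mid
--             start = mid + 1
--         else:
--             end = mid - 1
--
--     # Get the row and the column number
--     x = x - (p * (p + 1)) // 2
--     y = y + (q * (q + 1)) // 2
--     r = x
--     c = q + 1 - n + y
--
--     # Return the pair
--     return r, c
-- ===== SOURCE B (Python) =====
-- def solve(n):
--     # One linear scan replaces A's two identical binary searches: find the
--     # largest m in [1, 10**4] with m*(m+1)//2 <= n-1 (triangular numbers increase,
--     # so stop at the first that exceeds).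
--     t = n - 1
--     p = 0
--     m = 1
--     while m <= 10**4:
--         tri = m * (m + 1) // 2
--         if tri > t:
--             break
--         p = m
--         m += 1
--     x = n - p * (p + 1) // 2
--     y = 1 + p * (p + 1) // 2
--     return x, p + 1 - n + y
-- ===== Notes on version B (the rewrite author's own statement) =====
-- stated objective: simpler
-- what changed: A runs two separate binary searches that both compute the largest m in [1,10^4] with m*(m+1)//2 <= n-1; B computes that single index with one short linear scan that breaks at the first triangular number exceeding n-1, then applies the same final arithmetic.
import Mathlib
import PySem

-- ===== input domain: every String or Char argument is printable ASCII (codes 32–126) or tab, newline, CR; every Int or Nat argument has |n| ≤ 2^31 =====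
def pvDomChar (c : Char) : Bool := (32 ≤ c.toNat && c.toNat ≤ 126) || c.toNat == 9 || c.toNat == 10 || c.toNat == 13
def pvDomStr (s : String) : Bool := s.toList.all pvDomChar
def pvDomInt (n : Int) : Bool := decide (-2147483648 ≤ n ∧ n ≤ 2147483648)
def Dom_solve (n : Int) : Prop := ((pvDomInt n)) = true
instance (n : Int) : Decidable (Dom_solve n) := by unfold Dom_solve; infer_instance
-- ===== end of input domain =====

-- B replaces A's two identical binary searches by one linear scan for the same index (objective: simpler).

-- ===== PORT A =====
-- first while loop: binary search for the row index p (x = n throughout)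
def solveLoop1 (n low high p : Int) : Int :=
  if low ≤ high then
    let mid := PySem.Int.floordiv (low + high) 2
    let sum := PySem.Int.floordiv (mid * (mid + 1)) 2
    if n - sum ≥ 1 then solveLoop1 n (mid + 1) high mid
    else solveLoop1 n low (mid - 1) p
  else p
termination_by (high + 1 - low).toNat
decreasing_by
  · have h := PySem.Int.floordiv_two_mid_bounds (by assumption : low ≤ high)
    omega
  · have h := PySem.Int.floordiv_two_mid_bounds (by assumption : low ≤ high)
    omega

-- second while loop: binary search for the column index q (y = 1 throughout)
def solveLoop2 (n start stop q : Int) : Int :=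
  if start ≤ stop then
    let mid := PySem.Int.floordiv (start + stop) 2
    let sum := PySem.Int.floordiv (mid * (mid + 1)) 2
    if 1 + sum ≤ n then solveLoop2 n (mid + 1) stop mid
    else solveLoop2 n start (mid - 1) q
  else q
termination_by (stop + 1 - start).toNat
decreasing_by
  · have h := PySem.Int.floordiv_two_mid_bounds (by assumption : start ≤ stop)
    omega
  · have h := PySem.Int.floordiv_two_mid_bounds (by assumption : start ≤ stop)
    omega

def solve (n : Int) : Int × Int :=
  let x := n
  let p := solveLoop1 n 1 10000 0
  let q := solveLoop2 n 1 10000 0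
  let x2 := x - PySem.Int.floordiv (p * (p + 1)) 2
  let y2 := 1 + PySem.Int.floordiv (q * (q + 1)) 2
  let r := x2
  let c := q + 1 - n + y2
  (r, c)

-- ===== PORT B =====
-- single linear scan: largest m in [1, 10^4] with m*(m+1)//2 <= t, else 0
def solveAltLoop (t m p : Int) : Int :=
  if m ≤ 10000 then
    let tri := PySem.Int.floordiv (m * (m + 1)) 2
    if tri > t then p
    else solveAltLoop t (m + 1) m
  else p
termination_by (10001 - m).toNat
decreasing_by omega

def solve_alt (n : Int) : Int × Int :=
  let p := solveAltLoop (n - 1) 1 0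
  let x := n - PySem.Int.floordiv (p * (p + 1)) 2
  let y := 1 + PySem.Int.floordiv (p * (p + 1)) 2
  (x, p + 1 - n + y)

-- ===== PRECONDITION & SPEC =====
def Spec_solve (n : Int) (out : Int × Int) : Prop := out = solve_alt n
instance (n : Int) (out : Int × Int) : Decidable (Spec_solve n out) := by unfold Spec_solve; infer_instance

-- ===== CLAIM (what is proved, stated in full; the proofs are below) =====
def Claim_equal_solve : Prop := ∀ (n : Int), Dom_solve n → Spec_solve n (solve n)

-- ===== LEMMAS AND PROOFS =====

-- tri m = m*(m+1)//2 (exact, since m*(m+1) is even)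
def tri (m : Int) : Int := PySem.Int.floordiv (m * (m + 1)) 2

lemma two_mul_tri (m : Int) : 2 * tri m = m * (m + 1) := by
  obtain ⟨k, hk⟩ := Int.even_mul_succ_self m
  unfold tri
  rw [PySem.Int.floordiv_eq_ediv_of_pos (by norm_num)]
  omega

lemma tri_mono {a b : Int} (ha : 0 ≤ a) (hab : a ≤ b) : tri a ≤ tri b := by
  have h1 := two_mul_tri a
  have h2 := two_mul_tri b
  nlinarith

-- characterisation of the index both programs compute
def Good (n p : Int) : Prop :=
  (p = 0 ∨ (1 ≤ p ∧ p ≤ 10000 ∧ tri p ≤ n - 1)) ∧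
  (∀ m, 1 ≤ m → m ≤ 10000 → tri m ≤ n - 1 → m ≤ p)

lemma Good_unique {n p q : Int} (hp : Good n p) (hq : Good n q) : p = q := by
  obtain ⟨hp1, hp2⟩ := hp
  obtain ⟨hq1, hq2⟩ := hq
  rcases hp1 with rfl | ⟨h1, h2, h3⟩ <;> rcases hq1 with rfl | ⟨g1, g2, g3⟩
  · rfl
  · have := hp2 q g1 g2 g3; omega
  · have := hq2 p h1 h2 h3; omega
  · have := hq2 p h1 h2 h3
    have := hp2 q g1 g2 g3
    omega

lemma solveLoop1_good (n low high p : Int) :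
    1 ≤ low → high ≤ 10000 →
    (p = 0 ∨ (1 ≤ p ∧ p ≤ 10000 ∧ tri p ≤ n - 1)) →
    (∀ m, 1 ≤ m → m < low → tri m ≤ n - 1 → m ≤ p) →
    (∀ m, high < m → m ≤ 10000 → ¬ tri m ≤ n - 1) →
    Good n (solveLoop1 n low high p) := by
  induction low, high, p using solveLoop1.induct n with
  | case1 low high p hle mid sum hcond ih =>
    intro hlo hhi hp hbelow habove
    have hmid : low ≤ mid ∧ mid ≤ high := PySem.Int.floordiv_two_mid_bounds hle
    have hc : n - tri mid ≥ 1 := hcond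
    rw [solveLoop1]
    simp only [if_pos hle]
    split_ifs with h
    · exact ih (by omega) hhi (Or.inr ⟨by omega, by omega, by omega⟩)
        (fun m hm1 hm2 hm3 => by omega) habove
    · exact absurd hcond h
  | case2 low high p hle mid sum hcond ih =>
    intro hlo hhi hp hbelow habove
    have hmid : low ≤ mid ∧ mid ≤ high := PySem.Int.floordiv_two_mid_bounds hle
    have hc : ¬ n - tri mid ≥ 1 := hcond
    rw [solveLoop1]
    simp only [if_pos hle]
    split_ifs with h
    · exact absurd h hcond
    · refine ih hlo (by omega) hp hbelow ?_
      intro m hm1 hm2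
      by_cases hcs : high < m
      · exact habove m hcs hm2
      · intro hcon
        have := tri_mono (show (0:Int) ≤ mid by omega) (show mid ≤ m by omega)
        omega
  | case3 low high p hgt =>
    intro hlo hhi hp hbelow habove
    rw [solveLoop1, if_neg hgt]
    refine ⟨hp, ?_⟩
    intro m h1 h2 h3
    by_cases hc : m < low
    · exact hbelow m h1 hc h3
    · exact absurd h3 (habove m (by omega) h2)

lemma solveLoop2_good (n start stop p : Int) :
    1 ≤ start → stop ≤ 10000 →
    (p = 0 ∨ (1 ≤ p ∧ p ≤ 10000 ∧ tri p ≤ n - 1)) →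
    (∀ m, 1 ≤ m → m < start → tri m ≤ n - 1 → m ≤ p) →
    (∀ m, stop < m → m ≤ 10000 → ¬ tri m ≤ n - 1) →
    Good n (solveLoop2 n start stop p) := by
  induction start, stop, p using solveLoop2.induct n with
  | case1 start stop p hle mid sum hcond ih =>
    intro hlo hhi hp hbestart habove
    have hmid : start ≤ mid ∧ mid ≤ stop := PySem.Int.floordiv_two_mid_bounds hle
    have hc : 1 + tri mid ≤ n := hcond
    rw [solveLoop2]
    simp only [if_pos hle]
    split_ifs with h
    · exact ih (by omega) hhi (Or.inr ⟨by omega, by omega, by omega⟩)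
        (fun m hm1 hm2 hm3 => by omega) habove
    · exact absurd hcond h
  | case2 start stop p hle mid sum hcond ih =>
    intro hlo hhi hp hbestart habove
    have hmid : start ≤ mid ∧ mid ≤ stop := PySem.Int.floordiv_two_mid_bounds hle
    have hc : ¬ 1 + tri mid ≤ n := hcond
    rw [solveLoop2]
    simp only [if_pos hle]
    split_ifs with h
    · exact absurd h hcond
    · refine ih hlo (by omega) hp hbestart ?_
      intro m hm1 hm2
      by_cases hcs : stop < m
      · exact habove m hcs hm2
      · intro hcon
        have := tri_mono (show (0:Int) ≤ mid by omega) (show mid ≤ m by omega)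
        omega
  | case3 start stop p hgt =>
    intro hlo hhi hp hbestart habove
    rw [solveLoop2, if_neg hgt]
    refine ⟨hp, ?_⟩
    intro m h1 h2 h3
    by_cases hc : m < start
    · exact hbestart m h1 hc h3
    · exact absurd h3 (habove m (by omega) h2)

lemma solveAltLoop_good (t m p : Int) :
    1 ≤ m →
    (p = 0 ∨ (1 ≤ p ∧ p ≤ 10000 ∧ tri p ≤ t)) →
    (∀ k, 1 ≤ k → k < m → tri k ≤ t → k ≤ p) →
    Good (t + 1) (solveAltLoop t m p) := by
  induction m, p using solveAltLoop.induct t with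
  | case1 m p hle trim hgt =>
    intro hm hp hbelow
    have hg : tri m > t := hgt
    rw [solveAltLoop]
    simp only [if_pos hle]
    split_ifs with h
    · constructor
      · rcases hp with rfl | ⟨a, b, c⟩
        · exact Or.inl rfl
        · exact Or.inr ⟨a, b, by omega⟩
      · intro k h1 h2 h3
        by_cases hc : k < m
        · exact hbelow k h1 hc (by omega)
        · exfalso
          have := tri_mono (show (0:Int) ≤ m by omega) (show m ≤ k by omega)
          omega
    · exact absurd hgt h
  | case2 m p hle trim hgt ih =>
    intro hm hp hbelow
    have hg : ¬ tri m > t := hgt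
    rw [solveAltLoop]
    simp only [if_pos hle]
    split_ifs with h
    · exact absurd h hgt
    · exact ih (by omega) (Or.inr ⟨by omega, hle, by omega⟩)
        (fun k h1 h2 h3 => by omega)
  | case3 m p hgt =>
    intro hm hp hbelow
    rw [solveAltLoop, if_neg hgt]
    constructor
    · rcases hp with rfl | ⟨a, b, c⟩
      · exact Or.inl rfl
      · exact Or.inr ⟨a, b, by omega⟩
    · intro k h1 h2 h3
      exact hbelow k h1 (by omega) (by omega)

lemma loops_agree (n : Int) :
    solveLoop1 n 1 10000 0 = solveAltLoop (n - 1) 1 0 ∧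
    solveLoop2 n 1 10000 0 = solveAltLoop (n - 1) 1 0 := by
  have h1 : Good n (solveLoop1 n 1 10000 0) :=
    solveLoop1_good n 1 10000 0 (by norm_num) (by norm_num) (Or.inl rfl)
      (fun m a b c => by omega) (fun m a b => by omega)
  have h2 : Good n (solveLoop2 n 1 10000 0) :=
    solveLoop2_good n 1 10000 0 (by norm_num) (by norm_num) (Or.inl rfl)
      (fun m a b c => by omega) (fun m a b => by omega)
  have h3 : Good n (solveAltLoop (n - 1) 1 0) := by
    have := solveAltLoop_good (n - 1) 1 0 (by norm_num) (Or.inl rfl)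
      (fun k a b c => by omega)
    simpa using this
  exact ⟨Good_unique h1 h3, Good_unique h2 h3⟩

-- ===== VERDICT (by name: the statement is the Claim_ definition above) =====
theorem solve_spec : Claim_equal_solve := by
  intro n _
  unfold Spec_solve solve solve_alt
  obtain ⟨h1, h2⟩ := loops_agree n
  simp only [h1, h2]
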